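-- pv_equiv track=rewrite | github.com/RaihanRasheedApurbo/AES-Encryption-Algorithm-Computer-Security | solution.py | list1DToList2DColumnMajor
-- ===== SOURCE A (Python) =====
-- import math
--
-- def list1DToList2DColumnMajor(myList):
--     list2D = []
--     length = int(math.sqrt(len(myList)))
--     for i in range(length):
--         list2D.append([0]*length)
--     for i in range(length):
--         for j in range(length):
--             list2D[j][i] = myList[i*length+j]
--     return list2D
-- ===== SOURCE B (Python) =====
-- import math
--
-- def list1DToList2DColumnMajor(myList):
--     length = int(math.sqrt(len(myList)))
--     chunks = [myList[i*length:(i+1)*length] for i in range(length)]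
--     return [list(row) for row in zip(*chunks)]
-- ===== Notes on version B (the rewrite author's own statement) =====
-- stated objective: idiomatic
-- what changed: Replaces A's preallocated zero matrix filled by nested index-scatter assignments with an idiomatic slice-into-chunks plus zip(*...) transpose pipeline.
import Mathlib
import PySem

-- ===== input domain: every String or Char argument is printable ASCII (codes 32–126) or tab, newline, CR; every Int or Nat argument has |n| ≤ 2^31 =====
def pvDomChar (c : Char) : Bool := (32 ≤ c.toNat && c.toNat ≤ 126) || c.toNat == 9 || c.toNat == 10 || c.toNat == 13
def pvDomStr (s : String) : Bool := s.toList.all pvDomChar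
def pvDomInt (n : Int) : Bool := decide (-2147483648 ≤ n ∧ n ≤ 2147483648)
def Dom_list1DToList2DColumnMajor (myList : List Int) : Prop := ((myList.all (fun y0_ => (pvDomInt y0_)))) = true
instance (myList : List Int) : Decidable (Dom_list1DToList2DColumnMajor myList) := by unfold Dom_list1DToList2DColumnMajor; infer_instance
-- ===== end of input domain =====

-- B replaces A's preallocated zero matrix + index scatter with slice-into-chunks then zip-transpose (idiomatic; same O(n) cost).

-- ===== PORT A =====
-- int(math.sqrt(len(myList))) = Nat.sqrt (exact for all feasible list lengths);
-- myList[i*length+j] is always in range (i*length+j < length² ≤ len myList), so getD 0 is exact.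
def list1DToList2DColumnMajor (myList : List Int) : List (List Int) :=
  let length := Nat.sqrt myList.length
  let list2D := (List.range length).foldl (fun acc _ => acc ++ [List.replicate length (0 : Int)]) []
  (List.range length).foldl (fun l2 i =>
    (List.range length).foldl (fun l2 j =>
      l2.set j ((l2.getD j []).set i (myList.getD (i * length + j) 0))) l2) list2D

-- ===== PORT B =====
-- termination helper for the zip(*…) recursion (cited by decreasing_by)
theorem pvSumTailLt (ls : List (List Int)) (h1 : ls ≠ []) (h2 : ∀ l ∈ ls, l ≠ []) :
    ((ls.map List.tail).map List.length).sum < (ls.map List.length).sum := by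
  induction ls with
  | nil => exact absurd rfl h1
  | cons a t ih =>
    simp only [List.map_cons, List.sum_cons]
    have ha : a ≠ [] := h2 a (by simp)
    have h1' : a.tail.length < a.length := by
      cases a with
      | nil => exact absurd rfl ha
      | cons x xs => simp
    have h2' : ((t.map List.tail).map List.length).sum ≤ (t.map List.length).sum := by
      simp only [List.map_map]
      exact List.sum_le_sum (fun l _ => by simp [List.length_tail])
    omega

-- port of Python's zip(*ls) followed by list() on each row (exact: stops at the first exhausted list)
def pyZipStar (ls : List (List Int)) : List (List Int) :=
  if h : ls.isEmpty ∨ ls.any List.isEmpty then []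
  else (ls.map (fun l => l.headD 0)) :: pyZipStar (ls.map List.tail)
termination_by (ls.map List.length).sum
decreasing_by
  refine lt_of_eq_of_lt ?_ (pvSumTailLt ls ?_ ?_)
  · congr 1; simp
  · intro hnil; exact h (Or.inl (by simp [hnil]))
  · intro l hl hle
    exact h (Or.inr (by simp only [List.any_eq_true]; exact ⟨l, hl, by simp [hle]⟩))

def list1DToList2DColumnMajor_alt (myList : List Int) : List (List Int) :=
  let length := Nat.sqrt myList.length
  let chunks := (List.range length).map
    (fun i => PySem.List.slice myList (some ((i * length : Nat) : Int)) (some (((i + 1) * length : Nat) : Int)))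
  pyZipStar chunks

-- ===== PRECONDITION & SPEC =====
def Spec_list1DToList2DColumnMajor (myList : List Int) (out : List (List Int)) : Prop := out = list1DToList2DColumnMajor_alt myList
instance (myList : List Int) (out : List (List Int)) : Decidable (Spec_list1DToList2DColumnMajor myList out) := by unfold Spec_list1DToList2DColumnMajor; infer_instance

-- ===== CLAIM (what is proved, stated in full; the proofs are below) =====
def Claim_equal_list1DToList2DColumnMajor : Prop := ∀ (myList : List Int), Dom_list1DToList2DColumnMajor myList → Spec_list1DToList2DColumnMajor myList (list1DToList2DColumnMajor myList)

-- ===== LEMMAS AND PROOFS =====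

-- A's first loop builds the zero matrix
theorem pvBuild (r : List Int) (n : Nat) (acc : List (List Int)) :
    (List.range n).foldl (fun acc _ => acc ++ [r]) acc = acc ++ List.replicate n r := by
  induction n generalizing acc with
  | zero => simp
  | succ m ih =>
    rw [List.range_succ, List.foldl_append]
    simp [ih, List.replicate_succ' (n := m)]

-- A's inner loop sets entry i of each row j to v j
theorem pvInner (i : Nat) (v : Nat → Int) (n : Nat) (l2 : List (List Int)) (hn : n ≤ l2.length) :
    ((List.range n).foldl (fun l2 j => l2.set j ((l2.getD j []).set i (v j))) l2).length = l2.length ∧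
    ∀ j, ((List.range n).foldl (fun l2 j => l2.set j ((l2.getD j []).set i (v j))) l2).getD j [] =
      if j < n then (l2.getD j []).set i (v j) else l2.getD j [] := by
  induction n with
  | zero => simp
  | succ m ih =>
    obtain ⟨hlen, hget⟩ := ih (by omega)
    rw [List.range_succ, List.foldl_append]
    set M := (List.range m).foldl (fun l2 j => l2.set j ((l2.getD j []).set i (v j))) l2 with hM
    simp only [List.foldl_cons, List.foldl_nil]
    constructor
    · simp [hlen]
    · intro j
      have hMm : M.getD m [] = l2.getD m [] := by rw [hget m]; simp
      by_cases hj : j = m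
      · subst hj
        rw [List.getD, List.getElem?_set_self (by omega)]
        simp only [List.getD] at hMm
        simp [hMm]
      · rw [List.getD, List.getElem?_set_ne (by omega), ← List.getD, hget j]
        by_cases h1 : j < m
        · simp [h1, Nat.lt_succ_of_lt h1]
        · have : ¬ j < m + 1 := by omega
          simp [h1, this]

-- A's outer loop: after k steps row j holds v i j at the positions i < k, 0 elsewhere
theorem pvOuter (len : Nat) (v : Nat → Nat → Int) (k : Nat) (hk : k ≤ len) :
    ((List.range k).foldl (fun l2 i =>
        (List.range len).foldl (fun l2 j => l2.set j ((l2.getD j []).set i (v i j))) l2)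
      (List.replicate len (List.replicate len (0 : Int)))).length = len ∧
    ∀ j < len, ((List.range k).foldl (fun l2 i =>
        (List.range len).foldl (fun l2 j => l2.set j ((l2.getD j []).set i (v i j))) l2)
      (List.replicate len (List.replicate len (0 : Int)))).getD j [] =
      (List.range len).map (fun i => if i < k then v i j else 0) := by
  induction k with
  | zero =>
    refine ⟨by simp, fun j hj => ?_⟩
    simp only [List.range_zero, List.foldl_nil]
    rw [List.getD, List.getElem?_replicate, if_pos hj, Option.getD_some]
    simp
  | succ m ih =>
    obtain ⟨hlen, hget⟩ := ih (by omega)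
    rw [List.range_succ, List.foldl_append]
    set M := (List.range m).foldl (fun l2 i =>
        (List.range len).foldl (fun l2 j => l2.set j ((l2.getD j []).set i (v i j))) l2)
      (List.replicate len (List.replicate len (0 : Int))) with hMdef
    simp only [List.foldl_cons, List.foldl_nil]
    obtain ⟨ilen, iget⟩ := pvInner m (fun j => v m j) len M (by omega)
    refine ⟨by rw [ilen, hlen], fun j hj => ?_⟩
    rw [iget j]
    simp only [hj, if_pos]
    rw [hget j hj]
    apply List.ext_getElem
    · simp
    · intro idx h1 h2
      simp only [List.length_map, List.length_range] at h2
      by_cases hidx : idx = m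
      · subst hidx
        rw [List.getElem_set_self (by simp; omega)]
        simp
      · rw [List.getElem_set_ne]
        · simp only [List.getElem_map, List.getElem_range]
          by_cases hlt : idx < m
          · simp [hlt, Nat.lt_succ_of_lt hlt]
          · have : ¬ idx < m + 1 := by omega
            simp [hlt, this]
        · simpa using fun h => hidx h.symm

-- zip(*ls) on equal-length lists is the column-indexed transpose
theorem pvZipStarEq (m : Nat) : ∀ (ls : List (List Int)), ls ≠ [] → (∀ l ∈ ls, l.length = m) →
    pyZipStar ls = (List.range m).map (fun j => ls.map (fun l => l.getD j 0)) := by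
  induction m with
  | zero =>
    intro ls h1 h2
    rw [pyZipStar.eq_def]
    have : ls.any List.isEmpty = true := by
      obtain ⟨a, t, rfl⟩ := List.exists_cons_of_ne_nil h1
      simp [List.isEmpty_iff, List.eq_nil_of_length_eq_zero (h2 a (by simp))]
    simp [this]
  | succ m ih =>
    intro ls h1 h2
    have hne : ∀ l ∈ ls, l ≠ [] := fun l hl => by
      have := h2 l hl; intro h; subst h; simp at this
    rw [pyZipStar.eq_def]
    have hcond : ¬ (ls.isEmpty ∨ ls.any List.isEmpty) := by
      simp only [not_or, List.any_eq_true, not_exists, not_and]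
      exact ⟨by simpa [List.isEmpty_iff] using h1,
        fun l hl => by simpa [List.isEmpty_iff] using hne l hl⟩
    rw [dif_neg hcond]
    have htne : ls.map List.tail ≠ [] := by simpa using h1
    have htlen : ∀ l ∈ ls.map List.tail, l.length = m := by
      intro l hl
      obtain ⟨l', hl', rfl⟩ := List.mem_map.mp hl
      have := h2 l' hl'
      simp [List.length_tail, this]
    rw [ih (ls.map List.tail) htne htlen]
    rw [List.range_succ_eq_map, List.map_cons]
    congr 1
    · apply List.map_congr_left
      intro l hl
      obtain ⟨a, t, rfl⟩ := List.exists_cons_of_ne_nil (hne l hl)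
      simp
    · rw [List.map_map]
      apply List.map_congr_left
      intro j _
      simp only [Function.comp]
      rw [List.map_map]
      apply List.map_congr_left
      intro l hl
      obtain ⟨a, t, rfl⟩ := List.exists_cons_of_ne_nil (hne l hl)
      simp

-- a list is determined by its length and its getD rows
theorem pvListEq (X : List (List Int)) (len : Nat) (f : Nat → List Int)
    (hlen : X.length = len) (hget : ∀ j < len, X.getD j [] = f j) :
    X = (List.range len).map f := by
  apply List.ext_getElem
  · simp [hlen]
  · intro j h1 h2
    simp only [List.length_map, List.length_range] at h2
    have h := hget j h2
    rw [List.getD, List.getElem?_eq_getElem h1, Option.getD_some] at h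
    simp [h]

-- ===== VERDICT (by name: the statement is the Claim_ definition above) =====
theorem list1DToList2DColumnMajor_spec : Claim_equal_list1DToList2DColumnMajor := by
  intro myList _
  unfold Spec_list1DToList2DColumnMajor list1DToList2DColumnMajor list1DToList2DColumnMajor_alt
  dsimp only
  set len := Nat.sqrt myList.length with hlen
  have hsq : len * len ≤ myList.length := by
    have h := Nat.sqrt_le' myList.length
    rwa [pow_two] at h
  have hchunk : ∀ i < len,
      PySem.List.slice myList (some ((i * len : Nat) : Int)) (some (((i + 1) * len : Nat) : Int))
        = (myList.drop (i * len)).take len := by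
    intro i _
    rw [PySem.List.slice_natCast, show (i + 1) * len - i * len = len from by
      rw [Nat.succ_mul]; omega]
  have hchunklen : ∀ i < len, ((myList.drop (i * len)).take len).length = len := by
    intro i hi
    have hmul : (i + 1) * len ≤ len * len := Nat.mul_le_mul_right len (by omega)
    simp only [List.length_take, List.length_drop]
    have hle : i * len + len ≤ myList.length := by
      calc i * len + len = (i + 1) * len := by rw [Nat.succ_mul]
        _ ≤ len * len := hmul
        _ ≤ myList.length := hsq
    omega
  rcases Nat.eq_zero_or_pos len with h0 | hpos
  · rw [h0, pyZipStar.eq_def]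
    simp
  · rw [pvBuild, List.nil_append]
    obtain ⟨alen, aget⟩ := pvOuter len (fun i j => myList.getD (i * len + j) 0) len (le_refl _)
    refine (pvListEq _ len _ alen aget).trans ?_
    have hBchunks : (List.range len).map
        (fun i => PySem.List.slice myList (some ((i * len : Nat) : Int)) (some (((i + 1) * len : Nat) : Int)))
        = (List.range len).map (fun i => (myList.drop (i * len)).take len) := by
      apply List.map_congr_left
      intro i hi
      exact hchunk i (List.mem_range.mp hi)
    rw [hBchunks]
    have hne : (List.range len).map (fun i => (myList.drop (i * len)).take len) ≠ [] := by
      simp only [ne_eq, List.map_eq_nil_iff, List.range_eq_nil]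
      omega
    have hall : ∀ l ∈ (List.range len).map (fun i => (myList.drop (i * len)).take len), l.length = len := by
      intro l hl
      obtain ⟨i, hi, rfl⟩ := List.mem_map.mp hl
      exact hchunklen i (List.mem_range.mp hi)
    rw [pvZipStarEq len _ hne hall]
    apply List.map_congr_left
    intro j hj
    have hj' := List.mem_range.mp hj
    rw [List.map_map]
    apply List.map_congr_left
    intro i hi
    have hi' := List.mem_range.mp hi
    simp only [Function.comp, hi', if_pos]
    have hidx : i * len + j < myList.length := by
      have hmul : (i + 1) * len ≤ len * len := Nat.mul_le_mul_right len (by omega)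
      have hs : (i + 1) * len = i * len + len := by rw [Nat.succ_mul]
      omega
    rw [List.getD, List.getD, List.getElem?_take_of_lt hj', List.getElem?_drop]
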